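-- pv_equiv track=rewrite | github.com/adam-fabricio/adventofcode | src/submarino.py | proximo_dia_lanterfish
-- ===== SOURCE A (Python) =====
-- def proximo_dia_lanterfish(lista_de_idade: list) -> list:
--     for i in range(len(lista_de_idade)):
--         lista_de_idade[i] = int(lista_de_idade[i])
--         if lista_de_idade[i] == 0:
--             lista_de_idade[i] = 6
--             lista_de_idade.append(8)
--         else:
--             lista_de_idade[i] -= 1
--     return lista_de_idade
-- ===== SOURCE B (Python) =====
-- def proximo_dia_lanterfish(lista_de_idade: list) -> list:
--     # Group positions by age, compute each distinct age's successor once,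
--     # scatter the successors back, then append one newborn per fish of age 0.
--     buckets = {}
--     for i, v in enumerate(lista_de_idade):
--         buckets.setdefault(int(v), []).append(i)
--     out = [0] * len(lista_de_idade)
--     for age, idxs in buckets.items():
--         new = 6 if age == 0 else age - 1
--         for i in idxs:
--             out[i] = new
--     out.extend([8] * len(buckets.get(0, [])))
--     lista_de_idade[:] = out
--     return lista_de_idade
-- ===== Notes on version B (the rewrite author's own statement) =====
-- stated objective: alternative
-- what changed: Instead of a single index loop that branches per element and appends mid-loop, B groups positions by age into a dict built once, computes each distinct age's successor once, scatters the successors back by position, and appends a newborn 8 per bucket-0 entry; same in-place mutation and returned list object.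
import Mathlib
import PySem

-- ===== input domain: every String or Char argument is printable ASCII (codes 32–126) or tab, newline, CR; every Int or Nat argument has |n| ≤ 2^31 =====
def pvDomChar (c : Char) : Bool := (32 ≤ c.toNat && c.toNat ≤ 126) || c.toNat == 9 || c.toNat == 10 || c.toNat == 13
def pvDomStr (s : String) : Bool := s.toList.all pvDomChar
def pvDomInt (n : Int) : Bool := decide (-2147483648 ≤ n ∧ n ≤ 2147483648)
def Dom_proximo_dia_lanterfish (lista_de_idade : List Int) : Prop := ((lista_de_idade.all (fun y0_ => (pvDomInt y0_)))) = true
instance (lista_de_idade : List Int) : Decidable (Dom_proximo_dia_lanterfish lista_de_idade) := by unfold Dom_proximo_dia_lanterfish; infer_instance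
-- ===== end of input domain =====

-- B groups positions by age into a dict built once, computes each distinct age's successor once and
-- scatters it back, then appends the newborns (alternative decomposition). Both A and B mutate the
-- argument list in place in Python; the equivalence proved here is about the return value only.


-- ===== PORT A =====
-- one iteration of A's for-loop body at index i (int() is the identity on Int;
-- i is always in range since the loop only appends, so getD's default is never used)
def pvStepA (st : List Int) (i : Nat) : List Int :=
  let v := st.getD i 0
  if v = 0 then (st.set i 6) ++ [8] else st.set i (v - 1)

def proximo_dia_lanterfish (lista_de_idade : List Int) : List Int :=
  (List.range lista_de_idade.length).foldl pvStepA lista_de_idade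

-- ===== PORT B =====
-- buckets.setdefault(int(v), []).append(i)  ≡  d[v] = d.get(v, []) + [i]  = Dict.modify v [] (· ++ [i])
def pvBuckets (l : List Int) : PySem.Dict Int (List Int) :=
  (PySem.List.enumerate l 0).foldl (fun d p => d.modify p.2 [] (· ++ [p.1])) PySem.Dict.empty

def proximo_dia_lanterfish_alt (lista_de_idade : List Int) : List Int :=
  let buckets := pvBuckets lista_de_idade
  let out0 := List.replicate lista_de_idade.length (0 : Int)
  let out := buckets.items.foldl (fun o kv =>
      let new : Int := if kv.1 = 0 then 6 else kv.1 - 1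
      kv.2.foldl (fun o i => PySem.List.pySetD o i new) o) out0
  out ++ List.replicate (buckets.getD 0 []).length 8

-- ===== PRECONDITION & SPEC =====
def Spec_proximo_dia_lanterfish (lista_de_idade : List Int) (out : List Int) : Prop := out = proximo_dia_lanterfish_alt lista_de_idade
instance (lista_de_idade : List Int) (out : List Int) : Decidable (Spec_proximo_dia_lanterfish lista_de_idade out) := by unfold Spec_proximo_dia_lanterfish; infer_instance

-- ===== CLAIM (what is proved, stated in full; the proofs are below) =====
def Claim_equal_proximo_dia_lanterfish : Prop := ∀ (lista_de_idade : List Int), Dom_proximo_dia_lanterfish lista_de_idade → Spec_proximo_dia_lanterfish lista_de_idade (proximo_dia_lanterfish lista_de_idade)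

-- ===== LEMMAS AND PROOFS =====

-- A's loop over done++todo++extra rewrites todo pointwise and appends an 8 per zero.
theorem pvStepA_key : ∀ (todo done extra : List Int),
    (List.range' done.length todo.length).foldl pvStepA (done ++ todo ++ extra)
      = done ++ todo.map (fun v => if v = 0 then 6 else v - 1) ++ extra
          ++ List.replicate (todo.count 0) 8 := by
  intro todo
  induction todo with
  | nil => intro done extra; simp
  | cons h t ih =>
    intro done extra
    rw [List.length_cons, List.range'_succ, List.foldl_cons]
    by_cases h0 : h = 0
    · have : pvStepA (done ++ (h :: t) ++ extra) done.length
          = (done ++ [(6 : Int)]) ++ t ++ (extra ++ [8]) := by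
        simp [pvStepA, h0]
      rw [this]
      have hlen : done.length + 1 = (done ++ [(6 : Int)]).length := by simp
      rw [hlen, ih (done ++ [6]) (extra ++ [8])]
      simp [h0, List.replicate_succ]
    · have : pvStepA (done ++ (h :: t) ++ extra) done.length
          = (done ++ [h - 1]) ++ t ++ extra := by
        simp [pvStepA, h0]
      rw [this]
      have hlen : done.length + 1 = (done ++ [h - 1]).length := by simp
      rw [hlen, ih (done ++ [h - 1]) extra]
      simp [h0]

-- the indices of l carrying value c, in order (bucket contents)
def pvIdxs (l : List Int) (c : Int) : List Int :=
  ((PySem.List.enumerate l 0).filter (fun p => p.2 == c)).map (·.1)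

theorem pvBuckets_getD (l : List Int) (c : Int) :
    (pvBuckets l).getD c [] = pvIdxs l c := by
  have h : pvBuckets l = ((PySem.List.enumerate l 0).map Prod.swap).foldl
      (fun d p => d.modify p.1 [] (· ++ [p.2])) PySem.Dict.empty := by
    rw [List.foldl_map]; simp [pvBuckets]
  rw [h, PySem.Dict.getD_foldl_modify_append]
  simp [pvIdxs, List.filter_map, Function.comp_def, List.map_map, PySem.Dict.getD_empty]

theorem pvBuckets_nodup_keys (l : List Int) : (pvBuckets l).keys.Nodup :=
  PySem.Dict.nodup_keys_foldl_modify_key (PySem.List.enumerate l 0)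
    (fun p => p.2) [] (fun _ p => (· ++ [p.1])) PySem.Dict.empty (by simp)

theorem pvBuckets_mem_keys (l : List Int) (c : Int) : c ∈ (pvBuckets l).keys ↔ c ∈ l := by
  rw [pvBuckets, PySem.Dict.keys_foldl_modify_key]
  simp [PySem.List.map_snd_enumerate, PySem.Dict.keys_empty]

theorem pvIdxs_mem (l : List Int) (c : Int) (j : Nat) (hj : j < l.length) :
    ((j : Int) ∈ pvIdxs l c) ↔ l[j] = c := by
  simp [pvIdxs, PySem.List.mem_enumerate_iff, hj]

theorem pvIdxs_nonneg (l : List Int) (c : Int) : ∀ i ∈ pvIdxs l c, 0 ≤ i := by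
  intro i hi
  simp [pvIdxs, PySem.List.mem_enumerate_iff] at hi
  obtain ⟨b, ⟨k, hk, h1, -⟩, -⟩ := hi
  omega

theorem pvIdxs_length (l : List Int) (c : Int) : (pvIdxs l c).length = l.count c := by
  have h2 : l.count c = ((PySem.List.enumerate l 0).map (·.2)).count c := by
    rw [PySem.List.map_snd_enumerate]
  rw [h2, List.count, List.countP_map]
  simp [pvIdxs, ← List.countP_eq_length_filter, Function.comp_def]

-- inner scatter loop: pointwise effect and length
theorem pvInner_length (is : List Int) (v : Int) : ∀ (o : List Int),
    (is.foldl (fun o i => PySem.List.pySetD o i v) o).length = o.length := by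
  induction is with
  | nil => intro o; rfl
  | cons i t ih => intro o; simp [List.foldl_cons, ih, PySem.List.length_pySetD]

theorem pvInner_get (is : List Int) (hnn : ∀ i ∈ is, 0 ≤ i) (v : Int) : ∀ (o : List Int) (j : Nat),
    (is.foldl (fun o i => PySem.List.pySetD o i v) o)[j]?
      = if (j : Int) ∈ is ∧ j < o.length then some v else o[j]? := by
  induction is with
  | nil => intro o j; simp
  | cons i t ih =>
    intro o j
    have hi : 0 ≤ i := hnn i (by simp)
    have ht : ∀ x ∈ t, 0 ≤ x := fun x hx => hnn x (by simp [hx])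
    rw [List.foldl_cons, ih ht]
    rw [PySem.List.pySetD_of_nonneg _ _ hi]
    simp only [List.length_set, List.getElem?_set, List.mem_cons]
    by_cases hji : (j : Int) = i
    · have : i.toNat = j := by omega
      simp [this, hji]
      by_cases hlt : j < o.length <;> simp [hlt]
    · have : ¬ i.toNat = j := by omega
      simp [this, hji]

-- outer scatter loop: length preserved and pointwise effect over a list of keys
theorem pvOuter_length (l : List Int) (f : Int → Int) : ∀ (ks : List Int) (o : List Int),
    (ks.foldl (fun o k => (pvIdxs l k).foldl (fun o i => PySem.List.pySetD o i (f k)) o) o).length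
      = o.length := by
  intro ks
  induction ks with
  | nil => intro o; rfl
  | cons k t ih => intro o; rw [List.foldl_cons, ih, pvInner_length]

theorem pvOuter_get (l : List Int) (f : Int → Int) : ∀ (ks : List Int) (o : List Int),
    o.length = l.length → ∀ (j : Nat) (_hj : j < l.length),
    (ks.foldl (fun o k => (pvIdxs l k).foldl (fun o i => PySem.List.pySetD o i (f k)) o) o)[j]?
      = if l[j] ∈ ks then some (f l[j]) else o[j]? := by
  intro ks
  induction ks with
  | nil => intro o _ j hj; simp
  | cons k t ih =>
    intro o ho j hj
    rw [List.foldl_cons]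
    rw [ih _ (by rw [pvInner_length]; exact ho) j hj]
    rw [pvInner_get _ (pvIdxs_nonneg l k) _ o j]
    simp only [pvIdxs_mem l k j hj]
    by_cases hk : l[j] = k
    · simp [hk, ho, hj]
    · simp [hk, List.mem_cons]

-- ===== VERDICT (by name: the statement is the Claim_ definition above) =====
theorem proximo_dia_lanterfish_spec : Claim_equal_proximo_dia_lanterfish := by
  intro l _
  show proximo_dia_lanterfish l = proximo_dia_lanterfish_alt l
  have hA : proximo_dia_lanterfish l
      = l.map (fun v => if v = 0 then 6 else v - 1) ++ List.replicate (l.count 0) 8 := by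
    have := pvStepA_key l [] []
    simp only [List.length_nil, List.nil_append, List.append_nil] at this
    simp [proximo_dia_lanterfish, List.range_eq_range', this]
  have hitems : (pvBuckets l).items
      = (pvBuckets l).keys.map (fun k => (k, (pvBuckets l).getD k [])) :=
    PySem.Dict.items_eq_map_keys _ (pvBuckets_nodup_keys l) []
  have hout : ((pvBuckets l).items.foldl (fun o kv =>
        kv.2.foldl (fun o i => PySem.List.pySetD o i (if kv.1 = 0 then (6:Int) else kv.1 - 1)) o)
        (List.replicate l.length 0))
      = l.map (fun v => if v = 0 then 6 else v - 1) := by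
    rw [hitems, List.foldl_map]
    simp only [pvBuckets_getD]
    apply List.ext_getElem?
    intro j
    by_cases hj : j < l.length
    · rw [pvOuter_get l (fun k => if k = 0 then (6:Int) else k - 1) _ _ (by simp) j hj]
      have hmem : l[j] ∈ (pvBuckets l).keys := (pvBuckets_mem_keys l _).2 (l.getElem_mem hj)
      simp [hmem, hj]
    · have h1 : (List.map (fun v => if v = 0 then (6:Int) else v - 1) l)[j]? = none := by
        simp; omega
      have h2 := pvOuter_length l (fun k => if k = 0 then (6:Int) else k - 1)
        (pvBuckets l).keys (List.replicate l.length 0)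
      rw [h1, List.getElem?_eq_none_iff]
      simp [h2]; omega
  simp only [proximo_dia_lanterfish_alt, hA, hout, pvBuckets_getD, pvIdxs_length]
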